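-- pv_equiv track=rewrite | github.com/prosecutorToolkit/prosecutor | helpers/misspellingsHelpers.py | get_upper_and_lower
-- ===== SOURCE A (Python) =====
-- from itertools import product
--
-- def get_upper_and_lower(string):
--     try: listOfSearch = string.split(',')
--     except:
--         listOfSearch = list()
--         listOfSearch.append(string)
--     return_string = ""
--     for term in listOfSearch:
--         strip_term = term.strip()
--         result = map(''.join, product(*((c.lower(), c.upper()) for c in strip_term)))
--         for variation in result:
--             return_string += variation + ","
--     return return_string
-- ===== SOURCE B (Python) =====
-- def get_upper_and_lower(string):
--     # Recursive depth-first emitter: for each term, walk its characters,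
--     # branching lower-then-upper, and emit each finished variation directly.
--     def emit(prefix, rest, out):
--         if not rest:
--             out.append(prefix + ',')
--         else:
--             emit(prefix + rest[0].lower(), rest[1:], out)
--             emit(prefix + rest[0].upper(), rest[1:], out)
--     out = []
--     for term in string.split(','):
--         emit('', term.strip(), out)
--     return ''.join(out)
-- ===== Notes on version B (the rewrite author's own statement) =====
-- stated objective: alternative
-- what changed: The itertools.product pipeline (building all lower/upper tuples then joining each) is replaced by a recursive depth-first emitter: recursion on the term's characters extends a prefix with the lower-cased then the upper-cased character and appends each completed variation directly to an output list, joined once at the end.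
import Mathlib
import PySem

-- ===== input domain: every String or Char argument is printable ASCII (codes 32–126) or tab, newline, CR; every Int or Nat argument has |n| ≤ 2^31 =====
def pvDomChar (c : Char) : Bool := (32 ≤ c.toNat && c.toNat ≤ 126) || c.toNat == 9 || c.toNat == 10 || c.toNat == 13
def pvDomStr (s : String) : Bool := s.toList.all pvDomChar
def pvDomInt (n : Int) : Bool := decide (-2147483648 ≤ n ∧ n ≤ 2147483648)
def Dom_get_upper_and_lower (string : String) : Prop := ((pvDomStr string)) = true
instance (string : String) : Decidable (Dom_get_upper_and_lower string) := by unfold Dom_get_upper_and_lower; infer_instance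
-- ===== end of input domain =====

-- B replaces the itertools.product pipeline by a recursive depth-first emitter over the term's
-- characters (lower branch before upper), appending each finished variation to an output list
-- joined once at the end (objective: alternative decomposition, same output).

-- ===== PORT A =====
-- itertools.product(*pools) ported as its documented implementation: a fold extending each partial tuple by every element of the next pool
def pvProduct (pools : List (List Char)) : List (List Char) :=
  pools.foldl (fun acc pool => acc.flatMap (fun v => pool.map (fun c => v ++ [c]))) [[]]

def get_upper_and_lower (string : String) : String :=
  -- try: string.split(',') — on a str argument split never raises, so the except branch is dead
  let listOfSearch := PySem.Chars.splitOn string.toList [',']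
  let return_string : List Char :=
    listOfSearch.foldl (fun rs term =>
      let strip_term := PySem.Chars.strip term
      -- result = map(''.join, product(*((c.lower(), c.upper()) for c in strip_term)))
      let result := pvProduct (strip_term.map (fun c => [PySem.Chars.lowerChar c, PySem.Chars.upperChar c]))
      result.foldl (fun rs variation => rs ++ variation ++ [',']) rs) []
  String.mk return_string

-- ===== PORT B =====
-- emit(pre, rest, out): depth-first recursion on rest, lower branch first, appending to out
def pvEmit (pre : List Char) : List Char → List (List Char) → List (List Char)
  | [], out => out ++ [pre ++ [',']]
  | c :: tail, out =>
      pvEmit (pre ++ [PySem.Chars.upperChar c]) tail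
        (pvEmit (pre ++ [PySem.Chars.lowerChar c]) tail out)

def get_upper_and_lower_alt (string : String) : String :=
  let out := (PySem.Chars.splitOn string.toList [',']).foldl
    (fun out term => pvEmit [] (PySem.Chars.strip term) out) []
  String.mk (PySem.Chars.join [] out)

-- ===== PRECONDITION & SPEC =====
def Spec_get_upper_and_lower (string : String) (out : String) : Prop := out = get_upper_and_lower_alt string
instance (string : String) (out : String) : Decidable (Spec_get_upper_and_lower string out) := by unfold Spec_get_upper_and_lower; infer_instance

-- ===== CLAIM (what is proved, stated in full; the proofs are below) =====
def Claim_equal_get_upper_and_lower : Prop := ∀ (string : String), Dom_get_upper_and_lower string → Spec_get_upper_and_lower string (get_upper_and_lower string)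

-- ===== LEMMAS AND PROOFS =====
lemma pvProdAux : ∀ (ps : List (List Char)) (acc : List (List Char)),
    ps.foldl (fun acc pool => acc.flatMap (fun v => pool.map (fun c => v ++ [c]))) acc
      = acc.flatMap (fun v => (pvProduct ps).map (fun t => v ++ t)) := by
  intro ps
  induction ps with
  | nil => intro acc; simp [pvProduct]
  | cons p ps ih =>
    intro acc
    rw [List.foldl_cons, ih]
    have hP : pvProduct (p :: ps) = p.flatMap (fun c => (pvProduct ps).map (fun t => c :: t)) := by
      unfold pvProduct
      rw [List.foldl_cons, ih]
      simp [List.flatMap_map]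
      rfl
    rw [hP]
    simp [List.flatMap_assoc, List.flatMap_map, List.map_flatMap, List.map_map,
      Function.comp_def, List.append_assoc]

lemma pvProduct_cons (p : List Char) (ps : List (List Char)) :
    pvProduct (p :: ps) = p.flatMap (fun c => (pvProduct ps).map (fun v => c :: v)) := by
  unfold pvProduct
  rw [List.foldl_cons, pvProdAux]
  simp [List.flatMap_map]
  rfl

lemma pvEmit_eq : ∀ (rest pre : List Char) (out : List (List Char)),
    pvEmit pre rest out
      = out ++ (pvProduct (rest.map (fun c => [PySem.Chars.lowerChar c, PySem.Chars.upperChar c]))).map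
          (fun v => pre ++ v ++ [',']) := by
  intro rest
  induction rest with
  | nil => intro pre out; simp [pvEmit, pvProduct]
  | cons c tail ih =>
    intro pre out
    show pvEmit (pre ++ [PySem.Chars.upperChar c]) tail
        (pvEmit (pre ++ [PySem.Chars.lowerChar c]) tail out) = _
    rw [ih, ih, List.map_cons, pvProduct_cons]
    simp [List.map_append, List.map_map, Function.comp_def, List.append_assoc]

lemma pvFoldlFlatten {α β : Type} (f : List β → α → List β) (g : α → List β)
    (h : ∀ acc t, f acc t = acc ++ g t) : ∀ (l : List α) (init : List β),
    l.foldl f init = init ++ (l.map g).flatten := by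
  intro l
  induction l with
  | nil => simp
  | cons x xs ih => intro init; rw [List.foldl_cons, h, List.map_cons, List.flatten_cons, ih, List.append_assoc]

lemma pvJoinNil : ∀ (pieces : List (List Char)), PySem.Chars.join [] pieces = pieces.flatten := by
  intro pieces
  induction pieces with
  | nil => simp [PySem.Chars.join_nil]
  | cons p rest ih =>
    cases rest with
    | nil => simp [PySem.Chars.join_singleton]
    | cons q r => rw [PySem.Chars.join_cons_cons, List.flatten_cons, ← ih]; simp

-- ===== VERDICT (by name: the statement is the Claim_ definition above) =====
theorem get_upper_and_lower_spec : Claim_equal_get_upper_and_lower := by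
  intro string _
  unfold Spec_get_upper_and_lower
  dsimp only [get_upper_and_lower, get_upper_and_lower_alt]
  congr 1
  rw [pvFoldlFlatten _
    (fun term => ((pvProduct ((PySem.Chars.strip term).map (fun c => [PySem.Chars.lowerChar c, PySem.Chars.upperChar c]))).map (fun v => v ++ [','])).flatten)
    (by
      intro acc t
      exact pvFoldlFlatten _ (fun v => v ++ [',']) (fun a v => List.append_assoc a v [',']) _ acc)]
  rw [pvFoldlFlatten _
    (fun term => (pvProduct ((PySem.Chars.strip term).map (fun c => [PySem.Chars.lowerChar c, PySem.Chars.upperChar c]))).map (fun v => [] ++ v ++ [',']))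
    (fun acc t => pvEmit_eq _ _ acc)]
  rw [pvJoinNil, List.nil_append, List.nil_append, List.flatten_flatten, List.map_map]
  congr 1
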